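-- pv_equiv track=rewrite | github.com/amitp-ai/Text_Summarization | Step_6_Literature_Survey_13-6-1/utils.py | word2sent_tokenizer
-- ===== SOURCE A (Python) =====
-- def word2sent_tokenizer(text):
--     output = []
--     temp = []
--     sent_splits = {'.', '?', '!', ':'}
--     for w in text:
--         temp.append(w)
--         if w in sent_splits:
--             output.append(temp)
--             temp = []
--     return output
-- ===== SOURCE B (Python) =====
-- def word2sent_tokenizer(text):
--     splits = {'.', '?', '!', ':'}
--     idxs = [i for i, w in enumerate(text) if w in splits]
--     output = []
--     start = 0
--     for i in idxs:
--         output.append(list(text[start:i + 1]))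
--         start = i + 1
--     return output
-- ===== Notes on version B (the rewrite author's own statement) =====
-- stated objective: alternative
-- what changed: B replaces A's single pass that accumulates a running temp list with a two-pass decomposition: first collect all punctuation indices via enumerate, then slice the text between consecutive split boundaries; the trailing tail after the last split index is never sliced, matching A's drop.
import Mathlib
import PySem

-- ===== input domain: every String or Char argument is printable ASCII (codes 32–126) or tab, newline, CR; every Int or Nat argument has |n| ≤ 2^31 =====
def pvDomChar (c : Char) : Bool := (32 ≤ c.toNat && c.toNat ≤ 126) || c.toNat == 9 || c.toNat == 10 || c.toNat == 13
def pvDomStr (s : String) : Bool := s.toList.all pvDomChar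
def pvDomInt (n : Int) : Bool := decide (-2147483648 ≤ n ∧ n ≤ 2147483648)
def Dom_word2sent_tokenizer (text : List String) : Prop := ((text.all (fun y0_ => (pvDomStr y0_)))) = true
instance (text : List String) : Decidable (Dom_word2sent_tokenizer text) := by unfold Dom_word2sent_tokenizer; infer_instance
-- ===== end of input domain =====

-- B replaces A's single accumulating pass by a two-pass scheme (collect punctuation indices, then slice between boundaries); alternative decomposition, same cost.


-- ===== PORT A =====
-- the set literal {'.', '?', '!', ':'} (membership test only)
def pvSentSplits : List String := [".", "?", "!", ":"]

def word2sent_tokenizer (text : List String) : List (List String) :=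
  (text.foldl
    (fun (st : List (List String) × List String) w =>
      let temp := st.2 ++ [w]
      if w ∈ pvSentSplits then (st.1 ++ [temp], ([] : List String)) else (st.1, temp))
    ([], [])).1

-- ===== PORT B =====
def word2sent_tokenizer_alt (text : List String) : List (List String) :=
  let idxs := ((PySem.List.enumerate text 0).filter (fun p => p.2 ∈ pvSentSplits)).map (·.1)
  (idxs.foldl
    (fun (st : List (List String) × Int) i =>
      (st.1 ++ [PySem.List.slice text (some st.2) (some (i + 1))], i + 1))
    ([], 0)).1

-- ===== PRECONDITION & SPEC =====
def Spec_word2sent_tokenizer (text : List String) (out : List (List String)) : Prop := out = word2sent_tokenizer_alt text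
instance (text : List String) (out : List (List String)) : Decidable (Spec_word2sent_tokenizer text out) := by unfold Spec_word2sent_tokenizer; infer_instance

-- ===== CLAIM (what is proved, stated in full; the proofs are below) =====
def Claim_equal_word2sent_tokenizer : Prop := ∀ (text : List String), Dom_word2sent_tokenizer text → Spec_word2sent_tokenizer text (word2sent_tokenizer text)

-- ===== LEMMAS AND PROOFS =====

-- common reference semantics: recursive sentence splitter with pending segment `temp`
def pvSegRec : List String → List String → List (List String)
  | [], _ => []
  | w :: ws, temp =>
    if w ∈ pvSentSplits then (temp ++ [w]) :: pvSegRec ws [] else pvSegRec ws (temp ++ [w])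

theorem pvA_eq_segRec (text : List String) :
    ∀ (o : List (List String)) (t : List String),
      (text.foldl
        (fun (st : List (List String) × List String) w =>
          let temp := st.2 ++ [w]
          if w ∈ pvSentSplits then (st.1 ++ [temp], ([] : List String)) else (st.1, temp))
        (o, t)).1 = o ++ pvSegRec text t := by
  induction text with
  | nil => intro o t; simp [pvSegRec]
  | cons w ws ih =>
    intro o t
    by_cases h : w ∈ pvSentSplits <;>
      simp [pvSegRec, h, ih, List.append_assoc]

theorem pvB_eq_segRec (text : List String) :
    ∀ (pre temp : List String) (out : List (List String)),
      ((((PySem.List.enumerate text (((pre.length + temp.length : Nat) : Int))).filter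
            (fun p => p.2 ∈ pvSentSplits)).map (·.1)).foldl
        (fun (st : List (List String) × Int) i =>
          (st.1 ++ [PySem.List.slice (pre ++ temp ++ text) (some st.2) (some (i + 1))], i + 1))
        (out, ((pre.length : Nat) : Int))).1 = out ++ pvSegRec text temp := by
  induction text with
  | nil => intro pre temp out; simp [PySem.List.enumerate, pvSegRec]
  | cons w ws ih =>
    intro pre temp out
    rw [PySem.List.enumerate_cons]
    by_cases h : w ∈ pvSentSplits
    · simp only [List.filter_cons, h, decide_true, if_true, List.map_cons, List.foldl_cons]
      have hslice : PySem.List.slice (pre ++ temp ++ (w :: ws)) (some ((pre.length : Nat) : Int))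
          (some (((pre.length + temp.length : Nat) : Int) + 1)) = temp ++ [w] := by
        have h2 : (((pre.length + temp.length : Nat) : Int) + 1) = ((pre.length + (temp.length + 1) : Nat) : Int) := by push_cast; ring
        rw [h2, PySem.List.slice_natCast]
        simp
        rw [List.take_append]
        simp
      rw [hslice]
      have hb := ih (pre ++ temp ++ [w]) [] (out ++ [temp ++ [w]])
      have hl : (((pre ++ temp ++ [w]).length + ([] : List String).length : Nat) : Int)
          = ((pre.length + temp.length : Nat) : Int) + 1 := by simp; omega
      rw [hl] at hb
      have hT : (pre ++ temp ++ [w]) ++ [] ++ ws = pre ++ temp ++ (w :: ws) := by simp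
      rw [hT] at hb
      have hs : (((pre ++ temp ++ [w]).length : Nat) : Int) = ((pre.length + temp.length : Nat) : Int) + 1 := by simp; omega
      rw [hs] at hb
      rw [hb]
      simp [pvSegRec, h]
    · simp only [List.filter_cons, h, decide_false, Bool.false_eq_true, if_false]
      have hb := ih pre (temp ++ [w]) out
      have hl : ((pre.length + (temp ++ [w]).length : Nat) : Int)
          = ((pre.length + temp.length : Nat) : Int) + 1 := by simp; omega
      rw [hl] at hb
      have hT : pre ++ (temp ++ [w]) ++ ws = pre ++ temp ++ (w :: ws) := by simp
      rw [hT] at hb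
      rw [hb]
      simp [pvSegRec, h]

-- ===== VERDICT (by name: the statement is the Claim_ definition above) =====
theorem word2sent_tokenizer_spec : Claim_equal_word2sent_tokenizer := by
  intro text _
  unfold Spec_word2sent_tokenizer word2sent_tokenizer word2sent_tokenizer_alt
  have hB := pvB_eq_segRec text [] [] []
  simpa [pvA_eq_segRec text [] []] using hB.symm
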